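-- pv_equiv track=rewrite | github.com/Gabenx/GlobaltekTechnicalTest | exercise2.py | list_conditions
-- ===== SOURCE A (Python) =====
-- def list_conditions(list:list):
--
--     output_list = []
--     #Evaluate each number for each condition
--     for number in list:
--         #If the number is > 1000 stop the execution and return the result
--         if number > 1000:
--             break
--         #If the number is > 600 ignore it
--         elif number > 600:
--             continue
--         #If the number is divisible by 5 then store it in the output list
--         elif number%5 == 0:
--             output_list.append(number)
--
--     return output_list
-- ===== SOURCE B (Python) =====
-- def list_conditions(list: list):
--     # two passes: locate the break point, then filter the live prefix
--     cut = next((i for i, n in enumerate(list) if n > 1000), len(list))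
--     return [n for n in list[:cut] if n <= 600 and n % 5 == 0]
-- ===== Notes on version B (the rewrite author's own statement) =====
-- stated objective: idiomatic
-- what changed: Replaces the single interleaved loop with break/continue/append by two passes: next(...) over enumerate finds the index of the first element > 1000 (the break point), then a filtering comprehension over the slice before it keeps the multiples of 5 that are <= 600.
import Mathlib
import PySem

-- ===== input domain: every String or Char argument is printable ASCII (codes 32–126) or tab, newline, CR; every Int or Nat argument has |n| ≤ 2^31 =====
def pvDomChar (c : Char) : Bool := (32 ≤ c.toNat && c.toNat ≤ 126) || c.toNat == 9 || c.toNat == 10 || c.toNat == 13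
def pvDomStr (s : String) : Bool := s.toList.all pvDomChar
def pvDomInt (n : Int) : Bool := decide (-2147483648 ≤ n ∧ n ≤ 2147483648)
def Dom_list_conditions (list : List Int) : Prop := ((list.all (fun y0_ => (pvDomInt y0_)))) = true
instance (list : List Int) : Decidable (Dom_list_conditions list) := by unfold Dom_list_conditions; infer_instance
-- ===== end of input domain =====

-- B replaces the interleaved break/continue/append loop by two passes (find the break index, then filter the prefix); idiomatic, same cost.


-- ===== PORT A =====
-- the for-loop with break/continue, as structural recursion over the list
def list_conditions (list : List Int) : List Int :=
  match list with
  | [] => []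
  | number :: rest =>
    if number > 1000 then []                                   -- break
    else if number > 600 then list_conditions rest             -- continue
    else if PySem.Int.mod number 5 == 0 then number :: list_conditions rest
    else list_conditions rest

-- ===== PORT B =====
-- cut = next((i for i, n in enumerate(list) if n > 1000), len(list)): scan for the first index whose element is > 1000
def cutIdx_alt (list : List Int) : Nat :=
  match list with
  | [] => 0
  | n :: rest => if n > 1000 then 0 else cutIdx_alt rest + 1

-- [n for n in list[:cut] if n <= 600 and n % 5 == 0]
def list_conditions_alt (list : List Int) : List Int :=
  (list.take (cutIdx_alt list)).filter (fun n => decide (n ≤ 600) && (PySem.Int.mod n 5 == 0))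

-- ===== PRECONDITION & SPEC =====
def Spec_list_conditions (list : List Int) (out : List Int) : Prop := out = list_conditions_alt list
instance (list : List Int) (out : List Int) : Decidable (Spec_list_conditions list out) := by unfold Spec_list_conditions; infer_instance

-- ===== CLAIM (what is proved, stated in full; the proofs are below) =====
def Claim_equal_list_conditions : Prop := ∀ (list : List Int), Dom_list_conditions list → Spec_list_conditions list (list_conditions list)

-- ===== LEMMAS AND PROOFS =====
theorem list_conditions_eq (list : List Int) : list_conditions list = list_conditions_alt list := by
  induction list with
  | nil => rfl
  | cons n rest ih =>
    simp only [list_conditions, list_conditions_alt, cutIdx_alt]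
    by_cases h1 : n > 1000
    · simp [h1]
    · by_cases h2 : n > 600
      · have : ¬ n ≤ 600 := by omega
        simp [h1, h2, this, ih, list_conditions_alt]
      · have h3 : n ≤ 600 := by omega
        by_cases h5 : PySem.Int.mod n 5 == 0
        · rw [beq_iff_eq, PySem.Int.mod_eq_zero_iff_dvd] at h5
          have h5' : n % 5 = 0 := Int.emod_eq_zero_of_dvd h5
          simp [h1, h2, h3, h5', ih, list_conditions_alt]
        · rw [beq_iff_eq, PySem.Int.mod_eq_zero_iff_dvd] at h5
          have h5' : ¬ n % 5 = 0 := fun h => h5 (Int.dvd_of_emod_eq_zero h)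
          simp [h1, h2, h3, h5', ih, list_conditions_alt]

-- ===== VERDICT (by name: the statement is the Claim_ definition above) =====
theorem list_conditions_spec : Claim_equal_list_conditions := by
  intro list _
  exact list_conditions_eq list
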